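-- pv_equiv track=rewrite | github.com/AyushParikh/CSCA48_assignments | a2/regex_functions.py | n_combinations
-- ===== SOURCE A (Python) =====
-- def n_combinations(s, n):
--     R"""(str, int) -> set of str
--     Return the set of all combinations of n characters in s.
--
--     Order of characters does not matter.
--
--     REQ: 0 <= n <= len(s)
--
--     >>> n_combinations('1234', 1) == {'1', '2', '3', '4'}
--     True
--     >>> n_combinations('1234', 2) == \
--     ... {'12', '13', '14', '23', '24', '34'}
--     True
--     >>> len(n_combinations('1234567890', 5)) == 252
--     True
--     """
--     # Base case: if REQ not met, no combinations are possible
--     if((n <= 0) or (n > len(s))):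
--         return set()
--
--     # Base case: if n is one, return the set of characters in s
--     if(n == 1):
--         return set(s)
--
--     # Recursive decomposition:
--     else:
--         # Set to return
--         combs = set()
--
--         # For each char,
--         for i in range(len(s)):
--             char = s[i]
--
--             # Find the combinations of all characters of s to the right
--             # of the current char, with smaller n
--             smaller_combs = n_combinations(s[(i + 1):], (n - 1))
--
--             # Concatenate char with each combination in smaller_combs
--             # and add to combs
--             combs.update({(char + comb) for comb in smaller_combs})
--
--         return combs
-- ===== SOURCE B (Python) =====
-- def n_combinations(s, n):
--     if n <= 0 or n > len(s):
--         return set()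
--     L = len(s)
--     # Bottom-up dynamic programming over (suffix start i, size k):
--     # prev[i] = set of all (k-1)-char combinations of s[i:], computed once each.
--     prev = [set(s[i:]) for i in range(L + 1)]          # k = 1
--     for k in range(2, n + 1):
--         cur = []
--         for i in range(L + 1):
--             combs = set()
--             for j in range(i, L):
--                 combs.update({s[j] + c for c in prev[j + 1]})
--             cur.append(combs)
--         prev = cur
--     return prev[0]
-- ===== Notes on version B (the rewrite author's own statement) =====
-- stated objective: alternative
-- what changed: Replaced A's naive recursion (each call loops over every starting index and recomputes the combinations of every suffix from scratch) by bottom-up dynamic programming: a table indexed by (suffix start, combination size) filled iteratively one size at a time, so each subproblem is computed exactly once.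
import Mathlib
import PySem

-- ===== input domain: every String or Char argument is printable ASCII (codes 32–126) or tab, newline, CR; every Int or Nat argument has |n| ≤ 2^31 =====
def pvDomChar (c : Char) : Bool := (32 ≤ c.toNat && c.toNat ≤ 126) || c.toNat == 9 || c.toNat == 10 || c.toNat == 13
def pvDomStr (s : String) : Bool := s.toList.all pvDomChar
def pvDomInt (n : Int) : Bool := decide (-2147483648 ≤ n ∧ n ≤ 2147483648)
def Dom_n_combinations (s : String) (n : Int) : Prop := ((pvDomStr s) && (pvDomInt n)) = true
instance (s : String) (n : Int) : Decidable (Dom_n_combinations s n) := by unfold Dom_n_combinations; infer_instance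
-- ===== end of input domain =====

-- B replaces A's naive recursion (which recomputes the combinations of every suffix over and over)
-- by bottom-up dynamic programming over (suffix start, size), computing each subproblem once
-- (objective: alternative).  Both programs return a Python set; the ports model it as PySem.Set
-- (distinct elements, first-insertion order) and the equivalence is exact on that model.

-- ===== PORT A =====
-- A's loop 'for i in range(len(s)): char = s[i]; … n_combinations(s[(i + 1):], n - 1) …' visits, in
-- order, every suffix of s: at index i, char is the head of the suffix s[i:] and s[(i+1):] is its
-- tail.  The loop is transcribed as the structural recursion nCombALoop over that char list,
-- threading the accumulator set 'combs'; combs.update({char + comb …}) is Set.update with the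
-- set comprehension PySem.Set.ofList (map …).  'char + comb' is exact single-char string concat,
-- written String.ofList (c :: comb.toList).
mutual
def nCombA (l : List Char) (n : Int) : PySem.Set String :=
  if n ≤ 0 ∨ n > (l.length : Int) then PySem.Set.empty
  else if n = 1 then PySem.Set.ofList (l.map (fun c => String.ofList [c]))
  else nCombALoop l n PySem.Set.empty
termination_by 2 * l.length + 1
decreasing_by omega

def nCombALoop : List Char → Int → PySem.Set String → PySem.Set String
  | [], _, combs => combs
  | c :: t, n, combs =>
      nCombALoop t n (PySem.Set.update combs
        (PySem.Set.ofList ((nCombA t (n - 1)).map (fun comb => String.ofList (c :: comb.toList)))))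
termination_by l _ _ => 2 * l.length
decreasing_by all_goals (try simp only [List.length_cons]); all_goals omega
end

def n_combinations (s : String) (n : Int) : List String := nCombA s.toList n

-- ===== PORT B =====
-- Source B's inner loop 'for j in range(i, L): combs.update({s[j] + c for c in prev[j + 1]})':
-- List.range' i (L - i) is exactly range(i, L); s[j] / prev[j + 1] are always in range in Source B,
-- so they are the total lookups l.getD j ' ' / prev.getD (j+1) ∅ (exact on those indices).
def bInner (l : List Char) (prev : List (PySem.Set String)) (i : Nat) : PySem.Set String :=
  (List.range' i (l.length - i)).foldl
    (fun combs j => PySem.Set.update combs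
      (PySem.Set.ofList ((prev.getD (j + 1) PySem.Set.empty).map
        (fun c => String.ofList (l.getD j ' ' :: c.toList)))))
    PySem.Set.empty

-- 'cur = []; for i in range(L + 1): … cur.append(combs)' builds the list of all bInner values.
def bLevel (l : List Char) (prev : List (PySem.Set String)) : List (PySem.Set String) :=
  (List.range (l.length + 1)).map (fun i => bInner l prev i)

-- 'prev = [set(s[i:]) for i in range(L + 1)]' then 'for k in range(2, n + 1): prev = cur';
-- the returned 'prev[0]' is the total lookup .getD 0 ∅ (index 0 always exists in Source B).
def n_combinations_alt (s : String) (n : Int) : List String :=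
  if n ≤ 0 ∨ n > (s.toList.length : Int) then PySem.Set.empty
  else
    ((PySem.List.pyRange 2 (n + 1) 1).foldl (fun prev _ => bLevel s.toList prev)
      ((List.range (s.toList.length + 1)).map (fun i =>
        PySem.Set.ofList ((s.toList.drop i).map (fun c => String.ofList [c]))))).getD 0
      PySem.Set.empty

-- ===== PRECONDITION & SPEC =====
def Spec_n_combinations (s : String) (n : Int) (out : List String) : Prop := out = n_combinations_alt s n
instance (s : String) (n : Int) (out : List String) : Decidable (Spec_n_combinations s n out) := by unfold Spec_n_combinations; infer_instance

-- ===== CLAIM (what is proved, stated in full; the proofs are below) =====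
def Claim_equal_n_combinations : Prop := ∀ (s : String) (n : Int), Dom_n_combinations s n → Spec_n_combinations s n (n_combinations s n)

-- ===== LEMMAS AND PROOFS =====

-- Unfolding equations for the well-founded definitions, usable with explicit instantiation.
theorem nCombA_eqn (l : List Char) (n : Int) :
    nCombA l n =
      if n ≤ 0 ∨ n > (l.length : Int) then PySem.Set.empty
      else if n = 1 then PySem.Set.ofList (l.map (fun c => String.ofList [c]))
      else nCombALoop l n PySem.Set.empty := by
  conv_lhs => unfold nCombA

theorem nCombALoop_nil (n : Int) (combs : PySem.Set String) :
    nCombALoop [] n combs = combs := by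
  conv_lhs => unfold nCombALoop

theorem nCombALoop_cons (c : Char) (t : List Char) (n : Int) (combs : PySem.Set String) :
    nCombALoop (c :: t) n combs =
      nCombALoop t n (PySem.Set.update combs
        (PySem.Set.ofList ((nCombA t (n - 1)).map (fun comb => String.ofList (c :: comb.toList))))) := by
  conv_lhs => unfold nCombALoop

-- A's result for every suffix of l at size k: the DP table B maintains.
def tblA (l : List Char) (k : Int) : List (PySem.Set String) :=
  (List.range (l.length + 1)).map (fun i => nCombA (l.drop i) k)

theorem getD_map_range {α : Type} (f : Nat → α) (m j : Nat) (d : α) (hj : j < m) :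
    ((List.range m).map f).getD j d = f j := by
  simp [List.getD, hj]

theorem foldl_id {α β : Type} (xs : List β) (f : α → β → α)
    (h : ∀ j ∈ xs, ∀ c, f c j = c) : ∀ c, xs.foldl f c = c := by
  induction xs with
  | nil => intro c; rfl
  | cons x t ih =>
      intro c
      rw [List.foldl_cons, h x List.mem_cons_self, ih (fun j hj => h j (List.mem_cons_of_mem x hj))]

theorem nCombA_empty_of_lt (l : List Char) (k : Int) (h : (l.length : Int) < k) :
    nCombA l k = PySem.Set.empty := by
  rw [nCombA_eqn, if_pos (Or.inr h)]

-- The k = 1 layer: Source B's '[set(s[i:]) for i in range(L + 1)]' is A's table at size 1.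
theorem layer_one (l : List Char) :
    (List.range (l.length + 1)).map (fun i =>
        PySem.Set.ofList ((l.drop i).map (fun c => String.ofList [c]))) = tblA l 1 := by
  unfold tblA
  refine List.map_congr_left (fun i _ => ?_)
  cases hd : l.drop i with
  | nil => rw [nCombA_eqn]; simp
  | cons c t =>
      rw [nCombA_eqn,
        if_neg (by simp only [List.length_cons, not_or]; refine ⟨by omega, by push_cast; omega⟩),
        if_pos rfl]

-- B's inner loop from index j is A's loop over the suffix l.drop j.
theorem bInner_loop (l : List Char) (k : Int) :
    ∀ (m j : Nat), j + m = l.length → ∀ combs : PySem.Set String,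
      (List.range' j m).foldl
        (fun combs j => PySem.Set.update combs
          (PySem.Set.ofList (((tblA l (k - 1)).getD (j + 1) PySem.Set.empty).map
            (fun c => String.ofList (l.getD j ' ' :: c.toList))))) combs
      = nCombALoop (l.drop j) k combs := by
  intro m
  induction m with
  | zero =>
      intro j hj combs
      rw [List.range'_zero, List.foldl_nil, (by omega : j = l.length), List.drop_length,
        nCombALoop_nil]
  | succ m ih =>
      intro j hj combs
      have hjL : j < l.length := by omega
      have hg : l.getD j ' ' = l[j] := by simp [List.getD, List.getElem?_eq_getElem hjL]
      have hcell : (tblA l (k - 1)).getD (j + 1) PySem.Set.empty =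
          nCombA (l.drop (j + 1)) (k - 1) := by
        unfold tblA; exact getD_map_range _ _ _ _ (by omega)
      rw [List.range'_succ, List.foldl_cons, hcell, hg, ih (j + 1) (by omega),
        List.drop_eq_getElem_cons hjL, nCombALoop_cons]

-- One cell of B's table is A's value on that suffix (for sizes ≥ 2).
theorem bInner_eq (l : List Char) (k : Int) (hk : 2 ≤ k) (i : Nat) (hi : i ≤ l.length) :
    bInner l (tblA l (k - 1)) i = nCombA (l.drop i) k := by
  by_cases hle : k ≤ ((l.drop i).length : Int)
  · rw [nCombA_eqn,
      if_neg (by rw [not_or]; constructor <;> [omega; exact not_lt.mpr hle]),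
      if_neg (by omega)]
    exact bInner_loop l k (l.length - i) i (by omega) PySem.Set.empty
  · rw [nCombA_empty_of_lt _ _ (lt_of_not_ge hle)]
    unfold bInner
    refine foldl_id _ _ (fun j hj combs => ?_) _
    obtain ⟨hij, hjm⟩ := List.mem_range'_1.mp hj
    have hempty : nCombA (l.drop (j + 1)) (k - 1) = PySem.Set.empty := by
      refine nCombA_empty_of_lt _ _ ?_
      rw [List.length_drop]
      rw [List.length_drop] at hle
      omega
    have hcell : (tblA l (k - 1)).getD (j + 1) PySem.Set.empty =
        nCombA (l.drop (j + 1)) (k - 1) := by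
      unfold tblA; exact getD_map_range _ _ _ _ (by omega)
    rw [hcell, hempty]
    exact PySem.Set.update_nil combs

-- One DP level: Source B's 'cur' computed from A's table at k-1 is A's table at k.
theorem bLevel_eq (l : List Char) (k : Int) (hk : 2 ≤ k) :
    bLevel l (tblA l (k - 1)) = tblA l k := by
  unfold bLevel tblA
  refine List.map_congr_left (fun i hi => ?_)
  exact bInner_eq l k hk i (by have := List.mem_range.mp hi; omega)

-- The 'for k in range(2, n + 1)' fold climbs the table one size at a time.
theorem fold_levels (l : List Char) :
    ∀ (xs : List Int) (k : Int), 1 ≤ k →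
      xs.foldl (fun prev _ => bLevel l prev) (tblA l k) = tblA l (k + xs.length) := by
  intro xs
  induction xs with
  | nil => intro k _; simp
  | cons x t ih =>
      intro k hk
      have h1 : bLevel l (tblA l k) = tblA l (k + 1) := by
        have h := bLevel_eq l (k + 1) (by omega)
        rw [(by ring : (k + 1 - 1 : Int) = k)] at h
        exact h
      rw [List.foldl_cons, h1, ih (k + 1) (by omega), List.length_cons]
      congr 1
      push_cast
      omega

-- ===== VERDICT (by name: the statement is the Claim_ definition above) =====
theorem n_combinations_spec : Claim_equal_n_combinations := by
  intro s n _
  unfold Spec_n_combinations n_combinations n_combinations_alt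
  by_cases hg : n ≤ 0 ∨ n > (s.toList.length : Int)
  · rw [nCombA_eqn, if_pos hg, if_pos hg]
  · rw [if_neg hg, layer_one, fold_levels s.toList _ 1 le_rfl,
      PySem.List.length_pyRange_one]
    have hn1 : 1 ≤ n := by omega
    have hlen : (1 : Int) + ((n + 1 - 2).toNat : Int) = n := by omega
    rw [hlen]
    unfold tblA
    rw [getD_map_range _ _ _ _ (by omega), List.drop_zero]
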